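-- pv_equiv track=rewrite | github.com/Mithrasri-Kadarla/Summer-Training-2024 | 14th june 2024/recursion even odd sum.py | process_even_with_odds
-- ===== SOURCE A (Python) =====
-- def add_even_with_odds(even, b, result=None):
--     if result is None:
--         result = []
--
--     if not b:  # Base case: if list `b` is empty, return the result
--         return result
--
--     if b[0] % 2 != 0:  # If the current element of `b` is odd
--         result.append(even + b[0])
--
--     # Recur with the remaining elements of `b`
--     return add_even_with_odds(even, b[1:], result)
--
-- def process_even_with_odds(a, b, result=None):
--     if result is None:
--         result = []
--
--     if not a:  # Base case: if list `a` is empty, return the result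
--         return result
--
--     if a[0] % 2 == 0:  # If the first element of `a` is even
--         result = add_even_with_odds(a[0], b, result)
--
--     # Recur with the remaining elements of `a`
--     return process_even_with_odds(a[1:], b, result)
-- ===== SOURCE B (Python) =====
-- def process_even_with_odds(a, b, result=None):
--     if result is None:
--         result = []
--     result.extend(e + o for e in a if e % 2 == 0 for o in b if o % 2 != 0)
--     return result
-- ===== Notes on version B (the rewrite author's own statement) =====
-- stated objective: simpler
-- what changed: Replaced the two mutual recursions (one per list) by a single nested-iteration extend of the result list, preserving the even-outer/odd-inner append order.
import Mathlib
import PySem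

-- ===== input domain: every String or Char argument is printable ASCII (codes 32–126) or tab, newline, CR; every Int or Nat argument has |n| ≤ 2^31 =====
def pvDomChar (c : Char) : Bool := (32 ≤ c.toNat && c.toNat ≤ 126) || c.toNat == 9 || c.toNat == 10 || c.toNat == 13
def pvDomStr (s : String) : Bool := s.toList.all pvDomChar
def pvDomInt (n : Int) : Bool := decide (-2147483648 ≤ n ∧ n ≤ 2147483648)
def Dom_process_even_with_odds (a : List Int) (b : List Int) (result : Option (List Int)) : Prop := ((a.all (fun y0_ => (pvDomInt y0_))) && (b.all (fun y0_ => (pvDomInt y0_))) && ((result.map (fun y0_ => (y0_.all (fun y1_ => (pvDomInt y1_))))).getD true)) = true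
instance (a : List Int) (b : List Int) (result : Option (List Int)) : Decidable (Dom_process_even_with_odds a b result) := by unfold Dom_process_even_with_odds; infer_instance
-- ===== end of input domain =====

-- B replaces the two recursions by one nested-iteration extend; same return value (note: both Pythons mutate a caller-supplied result list in the same way, the proof is about the return value).
-- ===== PORT A =====
def add_even_with_odds (even : Int) (b : List Int) (result : List Int) : List Int :=
  match b with
  | [] => result
  | x :: rest =>
      add_even_with_odds even rest
        (if PySem.Int.mod x 2 ≠ 0 then result ++ [even + x] else result)

def process_even_with_odds_go (a : List Int) (b : List Int) (result : List Int) : List Int :=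
  match a with
  | [] => result
  | x :: rest =>
      process_even_with_odds_go rest b
        (if PySem.Int.mod x 2 = 0 then add_even_with_odds x b result else result)

def process_even_with_odds (a : List Int) (b : List Int) (result : Option (List Int)) : List Int :=
  process_even_with_odds_go a b (result.getD [])

-- ===== PORT B =====
def process_even_with_odds_alt (a : List Int) (b : List Int) (result : Option (List Int)) : List Int :=
  result.getD [] ++
    (a.filter (fun e => PySem.Int.mod e 2 == 0)).flatMap
      (fun e => (b.filter (fun o => PySem.Int.mod o 2 != 0)).map (fun o => e + o))

-- ===== PRECONDITION & SPEC =====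
def Spec_process_even_with_odds (a : List Int) (b : List Int) (result : Option (List Int)) (out : List Int) : Prop := out = process_even_with_odds_alt a b result
instance (a : List Int) (b : List Int) (result : Option (List Int)) (out : List Int) : Decidable (Spec_process_even_with_odds a b result out) := by unfold Spec_process_even_with_odds; infer_instance

-- ===== CLAIM (what is proved, stated in full; the proofs are below) =====
def Claim_equal_process_even_with_odds : Prop := ∀ (a : List Int) (b : List Int) (result : Option (List Int)), Dom_process_even_with_odds a b result → Spec_process_even_with_odds a b result (process_even_with_odds a b result)

-- ===== LEMMAS AND PROOFS =====

lemma pymod2 (x : Int) : PySem.Int.mod x 2 = x % 2 :=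
  PySem.Int.mod_eq_emod_of_pos (by norm_num)

lemma add_even_eq (even : Int) (b : List Int) (result : List Int) :
    add_even_with_odds even b result =
      result ++ (b.filter (fun o => PySem.Int.mod o 2 != 0)).map (fun o => even + o) := by
  induction b generalizing result with
  | nil => simp [add_even_with_odds]
  | cons x rest ih =>
      simp only [add_even_with_odds, List.filter_cons, pymod2]
      by_cases h : x % 2 = 0
      · have h1 : ¬ (x % 2 = 1) := by omega
        simp [h, h1, ih]
      · have h1 : x % 2 = 1 := by omega
        simp [pymod2, h1, ih]

lemma go_eq (a b result : List Int) :
    process_even_with_odds_go a b result =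
      result ++ (a.filter (fun e => PySem.Int.mod e 2 == 0)).flatMap
        (fun e => (b.filter (fun o => PySem.Int.mod o 2 != 0)).map (fun o => e + o)) := by
  induction a generalizing result with
  | nil => simp [process_even_with_odds_go]
  | cons x rest ih =>
      simp only [process_even_with_odds_go, List.filter_cons, pymod2]
      by_cases h : x % 2 = 0
      · have h1 : (2 : Int) ∣ x := by omega
        simp [pymod2, h, h1, ih, add_even_eq, List.append_assoc]
      · have h1 : ¬ ((2 : Int) ∣ x) := by omega
        simp [pymod2, h, h1, ih]

-- ===== VERDICT =====
theorem process_even_with_odds_spec : Claim_equal_process_even_with_odds := by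
  intro a b result _
  unfold Spec_process_even_with_odds process_even_with_odds process_even_with_odds_alt
  exact go_eq a b (result.getD [])
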